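-- pv_equiv track=rewrite | github.com/gagandeep-singh-sde/applet-generator | utilities/markup_generator.py | highlight_mph
-- ===== SOURCE A (Python) =====
-- def highlight_mph(mph):
--     if "=" not in mph:
--         return mph
--     parts = mph.split("=")
--     form = ""
--     pcount = len(parts)
--     if pcount == 2:
--         form = '<span class="bold">{}</span>{}'.format(parts[0], parts[1])
--     else:
--         n = -1
--         while len(parts):
--             part = parts.pop()
--             if n >= pcount:
--                 break
--             n += 1
--             if n == 0 and pcount > 1:
--                 fclass = ""
--                 form = "<span class='bold {}'>{}</span>".format(fclass, part)
--             elif n == 1 and pcount == 4: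
--                 form = "<span class='italic'>{}</span>{}".format(part, form)
--             elif n > 1 and pcount != 4:
--                 form = "<span class='bold'>{}</span>{}".format(part, form)
--             elif n == (pcount - 1) and pcount == 4:
--                 form = "<span class='bold'>{}</span>{}".format(part, form)
--             else:
--                 form = "{}{}".format(part, form)
--     return form
-- ===== SOURCE B (Python) =====
-- def highlight_mph(mph):
--     if "=" not in mph:
--         return mph
--     parts = mph.split("=")
--     m = len(parts)
--     if m == 2:
--         return '<span class="bold">{}</span>{}'.format(parts[0], parts[1])
--     frags = []
--     for i, part in enumerate(parts):
--         if i == m - 1: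
--             frags.append("<span class='bold '>{}</span>".format(part))
--         elif m == 4:
--             if i == 0:
--                 frags.append("<span class='bold'>{}</span>".format(part))
--             elif i == 1:
--                 frags.append(part)
--             else:
--                 frags.append("<span class='italic'>{}</span>".format(part))
--         elif i <= m - 3:
--             frags.append("<span class='bold'>{}</span>".format(part))
--         else:
--             frags.append(part)
--     return "".join(frags)
-- ===== Notes on version B (the rewrite author's own statement) =====
-- stated objective: simpler
-- what changed: Replaced A's destructive reverse loop (popping parts from the end while prepending onto an accumulator string under a stale counter) by a single forward pass that renders each part's fragment from its index and joins the fragments, dropping the dead n>=pcount break.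
import Mathlib
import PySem

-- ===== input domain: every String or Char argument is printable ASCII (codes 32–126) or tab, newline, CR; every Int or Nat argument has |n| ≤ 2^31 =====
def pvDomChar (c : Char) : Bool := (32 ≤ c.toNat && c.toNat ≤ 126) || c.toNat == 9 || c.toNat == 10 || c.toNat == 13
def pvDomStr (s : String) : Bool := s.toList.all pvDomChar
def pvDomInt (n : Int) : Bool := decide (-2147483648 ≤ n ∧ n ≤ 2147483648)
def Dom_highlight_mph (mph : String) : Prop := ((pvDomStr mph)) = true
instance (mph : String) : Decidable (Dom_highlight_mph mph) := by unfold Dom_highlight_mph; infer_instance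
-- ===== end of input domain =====

-- B replaces A's pop-from-the-end reverse loop by a forward index-driven render-and-join pass (objective: simpler).


-- ===== PORT A =====
-- the 'while len(parts): part = parts.pop(); …' loop of A, step for step (n+=1 inlined as n+1)
def highlight_mph_loop (pcount : Int) (parts : List String) (n : Int) (form : String) : String :=
  match h : PySem.List.pop? parts with
  | none => form
  | some (part, rest) =>
    if n ≥ pcount then form
    else
      if n + 1 = 0 ∧ pcount > 1 then
        highlight_mph_loop pcount rest (n + 1) ("<span class='bold '>" ++ part ++ "</span>")
      else if n + 1 = 1 ∧ pcount = 4 then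
        highlight_mph_loop pcount rest (n + 1) ("<span class='italic'>" ++ part ++ "</span>" ++ form)
      else if n + 1 > 1 ∧ pcount ≠ 4 then
        highlight_mph_loop pcount rest (n + 1) ("<span class='bold'>" ++ part ++ "</span>" ++ form)
      else if n + 1 = pcount - 1 ∧ pcount = 4 then
        highlight_mph_loop pcount rest (n + 1) ("<span class='bold'>" ++ part ++ "</span>" ++ form)
      else
        highlight_mph_loop pcount rest (n + 1) (part ++ form)
termination_by parts.length
decreasing_by
  all_goals (have hl := PySem.List.length_of_pop?_eq_some parts (r := (part, rest)) h; simp at hl ⊢; omega)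

def highlight_mph (mph : String) : String :=
  if !(PySem.Str.isIn "=" mph) then mph
  else
    let parts := (PySem.Str.split? mph "=").getD []
    let pcount : Int := parts.length
    if pcount = 2 then
      "<span class=\"bold\">" ++ PySem.List.pyGetD parts 0 "" ++ "</span>" ++ PySem.List.pyGetD parts 1 ""
    else
      highlight_mph_loop pcount parts (-1) ""

-- ===== PORT B =====
-- B's per-part fragment, chosen from the forward index i (m = number of parts)
def highlight_mph_frag (m : Int) (i : Int) (part : String) : String :=
  if i = m - 1 then "<span class='bold '>" ++ part ++ "</span>"
  else if m = 4 then
    (if i = 0 then "<span class='bold'>" ++ part ++ "</span>"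
     else if i = 1 then part
     else "<span class='italic'>" ++ part ++ "</span>")
  else if i ≤ m - 3 then "<span class='bold'>" ++ part ++ "</span>"
  else part

def highlight_mph_alt (mph : String) : String :=
  if !(PySem.Str.isIn "=" mph) then mph
  else
    let parts := (PySem.Str.split? mph "=").getD []
    let m : Int := parts.length
    if m = 2 then
      "<span class=\"bold\">" ++ PySem.List.pyGetD parts 0 "" ++ "</span>" ++ PySem.List.pyGetD parts 1 ""
    else
      PySem.Str.join "" ((PySem.List.enumerate parts 0).map (fun p => highlight_mph_frag m p.1 p.2))

-- ===== PRECONDITION & SPEC =====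

def Spec_highlight_mph (mph : String) (out : String) : Prop := out = highlight_mph_alt mph
instance (mph : String) (out : String) : Decidable (Spec_highlight_mph mph out) := by unfold Spec_highlight_mph; infer_instance

-- ===== CLAIM (what is proved, stated in full; the proofs are below) =====
def Claim_equal_highlight_mph : Prop := ∀ (mph : String), Dom_highlight_mph mph → Spec_highlight_mph mph (highlight_mph mph)

-- ===== LEMMAS AND PROOFS =====


-- the result list of splitOn.go always carries at least acc + 1 pieces
lemma splitOn_go_len_ge (sep : List Char) :
    ∀ (fuel : Nat) (l cur : List Char) (acc : List (List Char)),
      acc.length + 1 ≤ (PySem.Chars.splitOn.go sep fuel l cur acc).length := by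
  intro fuel
  induction fuel with
  | zero => intro l cur acc; rw [PySem.Chars.splitOn.go.eq_def]; cases l <;> simp
  | succ f ih =>
    intro l cur acc
    rw [PySem.Chars.splitOn.go.eq_def]
    cases l with
    | nil => simp
    | cons c rest =>
      by_cases hp : sep.isPrefixOf (c :: rest) = true
      · simp only [hp, if_true]
        have := ih (List.drop sep.length (c :: rest)) [] (cur.reverse :: acc)
        simp at this ⊢; omega
      · simp only [hp]
        exact ih rest (c :: cur) acc

-- with '=' still ahead in l, splitOn.go produces at least acc + 2 pieces
lemma splitOn_go_len_two :
    ∀ (fuel : Nat) (l cur : List Char) (acc : List (List Char)),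
      l.length < fuel → '=' ∈ l →
      acc.length + 2 ≤ (PySem.Chars.splitOn.go ['='] fuel l cur acc).length := by
  intro fuel
  induction fuel with
  | zero => intro l cur acc h; omega
  | succ f ih =>
    intro l cur acc hlen hmem
    rw [PySem.Chars.splitOn.go.eq_def]
    cases l with
    | nil => simp at hmem
    | cons c rest =>
      by_cases hp : List.isPrefixOf ['='] (c :: rest) = true
      · simp only [hp, if_true]
        have := splitOn_go_len_ge ['='] f (List.drop (['='] : List Char).length (c :: rest)) [] (cur.reverse :: acc)
        simp at this ⊢; omega
      · simp only [hp]
        have hc : c ≠ '=' := by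
          intro hc; subst hc; simp [List.isPrefixOf] at hp
        have hrest : '=' ∈ rest := by
          rcases List.mem_cons.mp hmem with h | h
          · exact absurd h.symm hc
          · exact h
        have : rest.length < f := by simp at hlen; omega
        exact ih rest (c :: cur) acc this hrest

lemma length_splitOn_two (s : List Char) (h : '=' ∈ s) :
    2 ≤ (PySem.Chars.splitOn s ['=']).length := by
  unfold PySem.Chars.splitOn
  have := splitOn_go_len_two (s.length + 1) s [] [] (by omega) h
  simpa using this

-- ''.join distributes over appending one fragment
lemma chars_join_nil_append (xs : List (List Char)) (y : List Char) :
    PySem.Chars.join [] (xs ++ [y]) = PySem.Chars.join [] xs ++ y := by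
  induction xs with
  | nil => simp [PySem.Chars.join_nil, PySem.Chars.join_singleton]
  | cons a xs ih =>
    cases xs with
    | nil => simp [PySem.Chars.join_singleton, PySem.Chars.join_cons_cons]
    | cons b xs =>
      rw [List.cons_append, List.cons_append, PySem.Chars.join_cons_cons]
      rw [show (b :: xs) ++ [y] = b :: (xs ++ [y]) from rfl] at *
      rw [ih, PySem.Chars.join_cons_cons]
      simp [List.append_assoc]

lemma str_join_append (fs : List String) (g : String) :
    PySem.Str.join "" (fs ++ [g]) = PySem.Str.join "" fs ++ g := by
  apply String.toList_inj.mp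
  rw [String.toList_append, PySem.Str.toList_join, PySem.Str.toList_join]
  simp only [List.map_append, List.map_cons, List.map_nil]
  have : ("" : String).toList = [] := rfl
  rw [this, chars_join_nil_append]

lemma str_join_empty : PySem.Str.join "" ([] : List String) = "" := by
  apply String.toList_inj.mp
  rw [PySem.Str.toList_join]
  simp [PySem.Chars.join_nil]


-- the reverse loop of A over a STRICT prefix of the parts (every popped part gets n+1 ≥ 1)
-- computes B's forward join of fragments, prepended to the accumulated form
lemma highlight_mph_loop_prefix (m : Nat) (hm : 3 ≤ m) :
    ∀ (l : List String), l.length ≤ m - 1 → ∀ (form : String),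
      highlight_mph_loop (m : Int) l ((m : Int) - l.length - 1) form
        = PySem.Str.join "" ((PySem.List.enumerate l 0).map
            (fun p => highlight_mph_frag (m : Int) p.1 p.2)) ++ form := by
  intro l
  induction l using List.reverseRecOn with
  | nil =>
    intro _ form
    rw [highlight_mph_loop]
    have hp : PySem.List.pop? ([] : List String) = none := rfl
    rw [hp, PySem.List.enumerate_nil]
    simp [str_join_empty]
  | append_singleton l x ih =>
    intro hlen form
    have hk : l.length + 1 ≤ m - 1 := by simpa using hlen
    rw [highlight_mph_loop, PySem.List.pop?_last]
    dsimp only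
    have hng : ¬ ((m : Int) - (↑(l ++ [x]).length) - 1 ≥ (m : Int)) := by
      simp; omega
    rw [if_neg hng]
    have hn' : (m : Int) - (↑(l ++ [x]).length) - 1 + 1 = (m : Int) - l.length - 1 := by
      simp; omega
    rw [hn']
    have henum : (PySem.List.enumerate (l ++ [x]) 0).map
          (fun p => highlight_mph_frag (m : Int) p.1 p.2)
        = (PySem.List.enumerate l 0).map (fun p => highlight_mph_frag (m : Int) p.1 p.2)
          ++ [highlight_mph_frag (m : Int) (l.length : Int) x] := by
      rw [PySem.List.enumerate_append]
      simp [PySem.List.enumerate]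
    rw [henum, str_join_append]
    have hrec := fun f => ih (by omega) f
    have hne0 : ¬ ((m : Int) - l.length - 1 = 0 ∧ (m : Int) > 1) := by
      intro h; omega
    rw [if_neg hne0]
    by_cases h4 : m = 4
    · by_cases hk2 : l.length = 2
      · -- n+1 = 1, pcount = 4: italic
        rw [if_pos (by constructor <;> omega), hrec]
        have hf : highlight_mph_frag (m : Int) (l.length : Int) x
            = "<span class='italic'>" ++ x ++ "</span>" := by
          unfold highlight_mph_frag
          rw [if_neg (by omega), if_pos (by omega), if_neg (by omega), if_neg (by omega)]
        rw [hf]; simp only [String.append_assoc]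
      · rw [if_neg (by intro h; omega), if_neg (by intro h; exact h.2 (by omega))]
        by_cases hk0 : l.length = 0
        · -- n+1 = pcount - 1, pcount = 4: bold
          rw [if_pos (by constructor <;> omega), hrec]
          have hf : highlight_mph_frag (m : Int) (l.length : Int) x
              = "<span class='bold'>" ++ x ++ "</span>" := by
            unfold highlight_mph_frag
            rw [if_neg (by omega), if_pos (by omega), if_pos (by omega)]
          rw [hf]; simp only [String.append_assoc]
        · -- l.length = 1: plain
          have hk1 : l.length = 1 := by omega
          rw [if_neg (by intro h; omega), hrec]
          have hf : highlight_mph_frag (m : Int) (l.length : Int) x = x := by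
            unfold highlight_mph_frag
            rw [if_neg (by omega), if_pos (by omega), if_neg (by omega), if_pos (by omega)]
          rw [hf]; simp only [String.append_assoc]
    · rw [if_neg (by intro h; exact h4 (by omega))]
      by_cases hk3 : (l.length : Int) ≤ (m : Int) - 3
      · -- n+1 > 1, pcount ≠ 4: bold
        rw [if_pos (by constructor <;> omega), hrec]
        have hf : highlight_mph_frag (m : Int) (l.length : Int) x
            = "<span class='bold'>" ++ x ++ "</span>" := by
          unfold highlight_mph_frag
          rw [if_neg (by omega), if_neg (by intro h; exact h4 (by omega)), if_pos hk3]
        rw [hf]; simp only [String.append_assoc]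
      · -- l.length = m - 2: plain
        rw [if_neg (by intro h; omega), if_neg (by intro h; exact h4 (by omega)), hrec]
        have hf : highlight_mph_frag (m : Int) (l.length : Int) x = x := by
          unfold highlight_mph_frag
          rw [if_neg (by omega), if_neg (by intro h; exact h4 (by omega)), if_neg hk3]
        rw [hf]; simp only [String.append_assoc]

-- the full loop: the first pop (n+1 = 0) discards the empty form and starts the accumulator
lemma highlight_mph_loop_full (m : Nat) (hm : 3 ≤ m) (parts : List String)
    (hp : parts.length = m) :
    highlight_mph_loop (m : Int) parts (-1) ""
      = PySem.Str.join "" ((PySem.List.enumerate parts 0).map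
          (fun p => highlight_mph_frag (m : Int) p.1 p.2)) := by
  rcases List.eq_nil_or_concat parts with h | ⟨l, x, h⟩
  · subst h; simp at hp; omega
  · subst h
    rw [List.concat_eq_append] at hp ⊢
    have hk : l.length + 1 = m := by simpa using hp
    rw [highlight_mph_loop, PySem.List.pop?_last]
    dsimp only
    rw [if_neg (by omega), if_pos (by constructor <;> omega)]
    have hn0 : (-1 : Int) + 1 = (m : Int) - l.length - 1 := by omega
    rw [hn0, highlight_mph_loop_prefix m hm l (by omega)]
    have henum : (PySem.List.enumerate (l ++ [x]) 0).map
          (fun p => highlight_mph_frag (m : Int) p.1 p.2)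
        = (PySem.List.enumerate l 0).map (fun p => highlight_mph_frag (m : Int) p.1 p.2)
          ++ [highlight_mph_frag (m : Int) (l.length : Int) x] := by
      rw [PySem.List.enumerate_append]
      simp [PySem.List.enumerate]
    rw [henum, str_join_append]
    have hf : highlight_mph_frag (m : Int) (l.length : Int) x
        = "<span class='bold '>" ++ x ++ "</span>" := by
      unfold highlight_mph_frag
      rw [if_pos (by omega)]
    rw [hf]

-- ===== VERDICT (by name: the statement is the Claim_ definition above) =====
theorem highlight_mph_spec : Claim_equal_highlight_mph := by
  intro mph _
  unfold Spec_highlight_mph highlight_mph highlight_mph_alt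
  by_cases hin : PySem.Str.isIn "=" mph = true
  · rw [hin]
    simp only [Bool.not_true, Bool.false_eq_true, if_false]
    by_cases h2 : (((PySem.Str.split? mph "=").getD []).length : Int) = 2
    · rw [if_pos h2, if_pos h2]
    · rw [if_neg h2, if_neg h2]
      have hmem : '=' ∈ mph.toList := by
        have hinf := (PySem.Str.isIn_iff_infix "=" mph).mp hin
        have hsub : (("=" : String).toList).Sublist mph.toList := hinf.sublist
        rw [show ("=" : String).toList = ['='] from rfl] at hsub
        exact List.singleton_sublist.mp hsub
      have hlen2 : 2 ≤ (PySem.Chars.splitOn mph.toList ['=']).length :=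
        length_splitOn_two mph.toList hmem
      have hplen : ((PySem.Str.split? mph "=").getD []).length
          = (PySem.Chars.splitOn mph.toList ['=']).length := by
        have h1 : PySem.Str.split? mph "="
            = Option.map (fun x => List.map String.ofList x)
                (PySem.Chars.split? mph.toList ("=" : String).toList) := by
          simp [PySem.Str.split?]
        have h2' : PySem.Chars.split? mph.toList ("=" : String).toList
            = some (PySem.Chars.splitOn mph.toList ['=']) := by
          rw [show ("=" : String).toList = ['='] from rfl, PySem.Chars.split?]
          simp
        rw [h1, h2']
        simp
      have hm3 : 3 ≤ ((PySem.Str.split? mph "=").getD []).length := by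
        rw [hplen]; rw [hplen] at h2; omega
      exact highlight_mph_loop_full _ hm3 _ rfl
  · simp only [Bool.not_eq_true] at hin
    rw [hin]
    simp
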